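-- pv_equiv track=rewrite | github.com/HanSeongDeok/before-dinner-algorithm | han_project/week11/week11 - 소수 만들기.py | dfs_prime_combination
-- ===== SOURCE A (Python) =====
-- def dfs_prime_combination(nums, i, current, result, limit):
--     if (len(current) == limit):
--         result.append(current[:])
--         return result
--
--     if (i == len(nums)):
--         return result
--
--     current.append(nums[i])
--     result = dfs_prime_combination(nums, i+1, current, result ,limit)
--
--     current.pop()
--     result = dfs_prime_combination(nums, i+1, current, result ,limit)
--
--     return result
-- ===== SOURCE B (Python) =====
-- def dfs_prime_combination(nums, i, current, result, limit):
--     if len(current) == limit: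
--         result.append(current[:])
--         return result
--     for j in range(i, len(nums)):
--         current.append(nums[j])
--         dfs_prime_combination(nums, j + 1, current, result, limit)
--         current.pop()
--     return result
-- ===== Notes on version B (the rewrite author's own statement) =====
-- stated objective: simpler
-- what changed: Replaced A's binary include/exclude recursion on one index per call with a suffix for-loop recursion that picks the next combination element among nums[i:], keeping the same output order and in-place mutation of current/result.
import Mathlib
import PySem

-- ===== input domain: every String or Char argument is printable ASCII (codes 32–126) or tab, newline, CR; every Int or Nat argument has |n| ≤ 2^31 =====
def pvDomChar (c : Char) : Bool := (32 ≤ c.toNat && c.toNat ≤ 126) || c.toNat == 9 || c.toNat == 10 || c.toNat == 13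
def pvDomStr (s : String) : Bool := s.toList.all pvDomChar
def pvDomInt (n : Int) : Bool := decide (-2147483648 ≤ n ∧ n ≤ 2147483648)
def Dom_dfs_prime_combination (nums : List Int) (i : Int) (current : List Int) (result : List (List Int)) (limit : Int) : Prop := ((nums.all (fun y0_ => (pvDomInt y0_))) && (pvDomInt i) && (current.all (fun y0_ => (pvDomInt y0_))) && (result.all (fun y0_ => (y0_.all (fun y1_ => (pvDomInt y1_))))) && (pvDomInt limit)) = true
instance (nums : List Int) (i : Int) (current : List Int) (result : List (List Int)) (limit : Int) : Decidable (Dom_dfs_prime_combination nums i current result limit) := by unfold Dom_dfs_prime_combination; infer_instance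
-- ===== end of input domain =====

-- B replaces A's binary include/exclude recursion by a suffix for-loop recursion (choose the
-- next element among nums[i:]); objective: simpler. Equivalence is about the RETURN value; both
-- Pythons mutate `result` in place identically and leave `current` net-unchanged.

-- ===== PORT A =====
def dfs_prime_combination (nums : List Int) (i : Int) (current : List Int) (result : List (List Int)) (limit : Int) : List (List Int) :=
  if (current.length : Int) == limit then result ++ [current]
  else if i == (nums.length : Int) then result
  else
    match h : PySem.List.pyGet? nums i with
    | none => result   -- Python raises IndexError here; excluded by Pre_
    | some v =>
      let result1 := dfs_prime_combination nums (i+1) (current ++ [v]) result limit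
      -- current.pop(): current is restored
      dfs_prime_combination nums (i+1) current result1 limit
termination_by (nums.length - i).toNat
decreasing_by
  all_goals
    have hin : PySem.Raise.InRange nums.length i := by
      by_contra hc
      rw [← PySem.List.pyGet?_eq_none_iff] at hc
      simp [hc] at h
    obtain ⟨_, hlt⟩ := hin
    omega

-- ===== PORT B =====
mutual
-- B: base case, then `for j in range(i, len(nums)): append nums[j]; recurse j+1; pop`
def dfs_prime_combination_alt (nums : List Int) (i : Int) (current : List Int) (result : List (List Int)) (limit : Int) : List (List Int) :=
  if (current.length : Int) == limit then result ++ [current]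
  else altLoop nums i current result limit
termination_by ((nums.length - i).toNat, 1)

-- the `for j in range(i, len(nums))` loop of B, j-indexed; nums[j] via pyGetD (in range on Pre_)
def altLoop (nums : List Int) (j : Int) (current : List Int) (result : List (List Int)) (limit : Int) : List (List Int) :=
  if j < (nums.length : Int) then
    altLoop nums (j+1) current
      (dfs_prime_combination_alt nums (j+1) (current ++ [PySem.List.pyGetD nums j 0]) result limit) limit
  else result
termination_by ((nums.length - j).toNat, 0)
decreasing_by
  · simp only [Prod.lex_def]; omega
  · simp only [Prod.lex_def]; omega
end

-- ===== PRECONDITION & SPEC =====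
-- Pre_ excludes exactly the inputs on which Python A raises IndexError at `nums[i]`
-- (an index i outside Python's range for nums, reached because len(current) != limit).
def Pre_dfs_prime_combination (nums : List Int) (i : Int) (current : List Int) (result : List (List Int)) (limit : Int) : Prop :=
  (current.length : Int) = limit ∨ (-(nums.length : Int) ≤ i ∧ i ≤ (nums.length : Int))
instance (nums : List Int) (i : Int) (current : List Int) (result : List (List Int)) (limit : Int) : Decidable (Pre_dfs_prime_combination nums i current result limit) := by unfold Pre_dfs_prime_combination; infer_instance

def pvWitness_dfs_prime_combination : List Int × Int × List Int × List (List Int) × Int := ([1, 2, 3], 0, [], [], 2)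

def Spec_dfs_prime_combination (nums : List Int) (i : Int) (current : List Int) (result : List (List Int)) (limit : Int) (out : List (List Int)) : Prop := out = dfs_prime_combination_alt nums i current result limit
instance (nums : List Int) (i : Int) (current : List Int) (result : List (List Int)) (limit : Int) (out : List (List Int)) : Decidable (Spec_dfs_prime_combination nums i current result limit out) := by unfold Spec_dfs_prime_combination; infer_instance

-- ===== CLAIM (what is proved, stated in full; the proofs are below) =====
def Claim_equal_dfs_prime_combination : Prop := ∀ (nums : List Int) (i : Int) (current : List Int) (result : List (List Int)) (limit : Int), Dom_dfs_prime_combination nums i current result limit → Pre_dfs_prime_combination nums i current result limit → Spec_dfs_prime_combination nums i current result limit (dfs_prime_combination nums i current result limit)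

-- ===== LEMMAS AND PROOFS =====

-- A returns `res` unchanged once i has passed the end of nums (no base-case hit).
lemma dfs_of_ge (nums : List Int) (i : Int) (cur : List Int) (res : List (List Int))
    (limit : Int) (hge : (nums.length : Int) ≤ i) (hne : (cur.length : Int) ≠ limit) :
    dfs_prime_combination nums i cur res limit = res := by
  rw [dfs_prime_combination, if_neg (by simpa using hne)]
  by_cases hi : i = (nums.length : Int)
  · rw [if_pos (by simpa using hi)]
  · rw [if_neg (by simpa using hi)]
    split
    · rfl
    · rename_i v heq
      have hnone : PySem.List.pyGet? nums i = none := by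
        rw [PySem.List.pyGet?_eq_none_iff]
        intro ⟨_, h2⟩; omega
      rw [hnone] at heq; cases heq

lemma altLoop_of_ge (nums : List Int) (j : Int) (cur : List Int) (res : List (List Int))
    (limit : Int) (h : ¬ j < (nums.length : Int)) :
    altLoop nums j cur res limit = res := by
  rw [altLoop, if_neg h]

-- The heart of the equivalence: when the base case does not fire, A's include/exclude
-- recursion from index i computes exactly B's suffix loop over j = i, i+1, …, len-1.
lemma dfs_eq_altLoop (nums : List Int) (limit : Int) :
    ∀ (k : Nat) (i : Int) (cur : List Int) (res : List (List Int)),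
      (nums.length - i).toNat ≤ k → -(nums.length : Int) ≤ i →
      (cur.length : Int) ≠ limit →
      dfs_prime_combination nums i cur res limit = altLoop nums i cur res limit := by
  intro k
  induction k with
  | zero =>
    intro i cur res hk hlo hne
    rw [dfs_of_ge nums i cur res limit (by omega) hne,
      altLoop_of_ge nums i cur res limit (by omega)]
  | succ k ih =>
    intro i cur res hk hlo hne
    by_cases hlt : i < (nums.length : Int)
    · -- i is a valid index: one loop iteration = include-then-exclude
      rw [altLoop, if_pos hlt]
      rw [dfs_prime_combination, if_neg (by simpa using hne), if_neg (by simp; omega)]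
      split
      · rename_i heq
        rw [PySem.List.pyGet?_eq_none_iff] at heq
        exact absurd ⟨hlo, hlt⟩ heq
      · rename_i v heq
        show dfs_prime_combination nums (i+1) cur
            (dfs_prime_combination nums (i+1) (cur ++ [v]) res limit) limit = _
        have hd : PySem.List.pyGetD nums i 0 = v := by
          simp [PySem.List.pyGetD, heq]
        rw [hd]
        have hinner : dfs_prime_combination nums (i+1) (cur ++ [v]) res limit
            = dfs_prime_combination_alt nums (i+1) (cur ++ [v]) res limit := by
          by_cases hb : ((cur ++ [v]).length : Int) = limit
          · rw [dfs_prime_combination, dfs_prime_combination_alt,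
              if_pos (by simpa using hb), if_pos (by simpa using hb)]
          · rw [dfs_prime_combination_alt, if_neg (by simpa using hb)]
            exact ih (i+1) (cur ++ [v]) res (by omega) (by omega) hb
        rw [hinner]
        exact ih (i+1) cur _ (by omega) (by omega) hne
    · -- loop over an empty range: both return res
      rw [dfs_of_ge nums i cur res limit (by omega) hne,
        altLoop_of_ge nums i cur res limit hlt]

-- ===== VERDICT (by name: the statement is the Claim_ definition above) =====
theorem dfs_prime_combination_spec : Claim_equal_dfs_prime_combination := by
  intro nums i cur res limit _ hpre
  unfold Spec_dfs_prime_combination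
  by_cases hb : (cur.length : Int) = limit
  · rw [dfs_prime_combination, dfs_prime_combination_alt,
      if_pos (by simpa using hb), if_pos (by simpa using hb)]
  · obtain hlo : -(nums.length : Int) ≤ i := by
      rcases hpre with h | ⟨h1, _⟩
      · exact absurd h hb
      · exact h1
    rw [dfs_prime_combination_alt, if_neg (by simpa using hb)]
    exact dfs_eq_altLoop nums limit ((nums.length - i).toNat) i cur res le_rfl hlo hb
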